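-- pv_equiv track=rewrite | github.com/sukam09/kakao-coding-test | 2019 카카오 개발자 겨울 인턴십/문제 3.py | solution
-- ===== SOURCE A (Python) =====
-- from collections import defaultdict
-- from itertools import product
--
-- def solution(user_id, banned_id):
--     candidates = defaultdict(set)
--     for bid in banned_id:
--         for uid in user_id:
--             if len(bid) != len(uid):
--                 continue
--             for b, u in zip(bid, uid):
--                 if b != '*' and b != u:
--                     break
--             else:
--                 candidates[bid].add(uid)
--
--     results = []
--     for bid in banned_id:
--         results.append(candidates[bid])
--
--     checker = {}
--     for p in product(*results):
--         if len(frozenset(p)) == len(banned_id) and frozenset(p) not in checker: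
--             checker[frozenset(p)] = True
--
--     return len(checker)
-- ===== SOURCE B (Python) =====
-- def solution(user_id, banned_id):
--     def matches(bid, uid):
--         return len(bid) == len(uid) and all(b == '*' or b == u for b, u in zip(bid, uid))
--
--     cand = [{uid for uid in user_id if matches(bid, uid)} for bid in banned_id]
--
--     found = set()
--
--     def go(i, used):
--         if i == len(cand):
--             found.add(frozenset(used))
--             return
--         for u in cand[i]:
--             if u not in used:
--                 used.add(u)
--                 go(i + 1, used)
--                 used.discard(u)
--
--     go(0, set())
--     return len(found)
-- ===== Notes on version B (the rewrite author's own statement) =====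
-- stated objective: alternative
-- what changed: B replaces A's full itertools.product enumeration of all candidate tuples followed by a distinctness filter with a recursive backtracking search that skips users already in a 'used' set, so only injective assignments are ever constructed, deduplicated as a set of frozensets.
import Mathlib
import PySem

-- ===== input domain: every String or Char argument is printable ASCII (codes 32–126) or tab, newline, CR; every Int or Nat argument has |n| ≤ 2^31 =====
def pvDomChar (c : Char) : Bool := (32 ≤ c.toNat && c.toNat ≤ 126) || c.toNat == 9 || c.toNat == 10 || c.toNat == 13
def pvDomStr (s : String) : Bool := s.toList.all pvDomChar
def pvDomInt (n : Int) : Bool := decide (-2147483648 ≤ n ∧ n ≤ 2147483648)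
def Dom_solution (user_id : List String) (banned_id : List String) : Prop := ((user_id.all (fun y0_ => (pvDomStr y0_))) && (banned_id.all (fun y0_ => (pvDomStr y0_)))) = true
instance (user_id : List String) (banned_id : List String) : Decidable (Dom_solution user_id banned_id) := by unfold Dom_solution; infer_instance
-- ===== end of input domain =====

-- B replaces A's itertools.product over all candidate tuples + distinctness filter by a
-- backtracking search over the patterns that skips already-used users (objective: alternative; same return value).

-- ===== PORT A =====
-- inner 'for b, u in zip(bid, uid): if b != '*' and b != u: break / else: add' loop;
-- returns true exactly when the loop finishes without break (the 'else' branch runs)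
def pvMatchLoop : List (Char × Char) → Bool
  | [] => true
  | (b, u) :: rest => if b ≠ '*' ∧ b ≠ u then false else pvMatchLoop rest

-- itertools.product(*results): leftmost factor varies slowest, exactly CPython's order
def pvProduct : List (List String) → List (List String)
  | [] => [[]]
  | r :: rs => r.flatMap (fun x => (pvProduct rs).map (fun p => x :: p))

-- 'checker' is a dict keyed by frozensets whose values are all True and which is only used for
-- membership and len: modelled faithfully as its key list in insertion order (frozenset = PySem.Set,
-- key equality = Python's frozenset equality = PySem.Set.equal).
def solution (user_id : List String) (banned_id : List String) : Int :=
  let candidates : PySem.Dict String (PySem.Set String) :=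
    banned_id.foldl (fun d bid =>
      user_id.foldl (fun d uid =>
        if PySem.Str.len bid ≠ PySem.Str.len uid then d
        else if pvMatchLoop (bid.toList.zip uid.toList) then
          d.insert bid (PySem.Set.add (d.getD bid []) uid)
        else d) d) PySem.Dict.empty
  let results : List (PySem.Set String) :=
    banned_id.foldl (fun rs bid => rs ++ [candidates.getD bid []]) []
  let checker : List (PySem.Set String) :=
    (pvProduct results).foldl (fun ch p =>
      if (PySem.Set.len (PySem.Set.ofList p) == (banned_id.length : Int)) &&
         !(ch.any (fun s => PySem.Set.equal s (PySem.Set.ofList p)))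
      then ch ++ [PySem.Set.ofList p] else ch) []
  (checker.length : Int)

-- ===== PORT B =====
def pvMatches (bid uid : String) : Bool :=
  PySem.Str.len bid == PySem.Str.len uid &&
  (bid.toList.zip uid.toList).all (fun bu => bu.1 == '*' || bu.1 == bu.2)

-- 'found.add(frozenset(used))' on a Python set of frozensets: membership by frozenset equality
-- (PySem.Set.equal), first insertion kept (hand-written here because found's elements are themselves sets)
def pvAddFS (found : List (PySem.Set String)) (s : PySem.Set String) : List (PySem.Set String) :=
  if found.any (fun t => PySem.Set.equal t s) then found else found ++ [s]

-- go(i, used): recursion over the remaining candidate sets; skips users already in 'used'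
def pvGo : List (PySem.Set String) → PySem.Set String → List (PySem.Set String) → List (PySem.Set String)
  | [], used, found => pvAddFS found used
  | c :: rest, used, found =>
      c.foldl (fun acc u =>
        if PySem.Set.contains used u then acc
        else pvGo rest (PySem.Set.add used u) acc) found

def solution_alt (user_id : List String) (banned_id : List String) : Int :=
  let cand : List (PySem.Set String) :=
    banned_id.map (fun bid => PySem.Set.ofList (user_id.filter (fun uid => pvMatches bid uid)))
  ((pvGo cand [] []).length : Int)

-- ===== PRECONDITION & SPEC =====
def Spec_solution (user_id : List String) (banned_id : List String) (out : Int) : Prop := out = solution_alt user_id banned_id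
instance (user_id : List String) (banned_id : List String) (out : Int) : Decidable (Spec_solution user_id banned_id out) := by unfold Spec_solution; infer_instance

-- ===== CLAIM (what is proved, stated in full; the proofs are below) =====
def Claim_equal_solution : Prop := ∀ (user_id : List String) (banned_id : List String), Dom_solution user_id banned_id → Spec_solution user_id banned_id (solution user_id banned_id)

-- ===== LEMMAS AND PROOFS =====

-- A's zip loop computes B's 'all' combinator
theorem pv_matchLoop_eq (l : List (Char × Char)) :
    pvMatchLoop l = l.all (fun bu => bu.1 == '*' || bu.1 == bu.2) := by
  induction l with
  | nil => rfl
  | cons hd tl ih =>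
    obtain ⟨b, u⟩ := hd
    simp only [pvMatchLoop, List.all_cons]
    by_cases hb : b = '*' <;> by_cases hu : b = u <;> simp [hb, hu, ih]

theorem pv_foldl_flatMap {α β γ : Type} (l : List α) (g : α → List β) (f : γ → β → γ) (a : γ) :
    (l.flatMap g).foldl f a = l.foldl (fun a x => (g x).foldl f a) a := by
  induction l generalizing a with
  | nil => rfl
  | cons hd tl ih => simp [List.flatMap_cons, List.foldl_append, ih]

theorem pv_ofList_sublist {α : Type} [BEq α] [LawfulBEq α] (p : List α) :
    (PySem.Set.ofList p).Sublist p := by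
  induction p with
  | nil => simp [PySem.Set.ofList_nil]
  | cons x xs ih =>
    rw [PySem.Set.ofList_cons]
    refine List.cons_sublist_cons.mpr ?_
    exact List.Sublist.trans (List.filter_sublist) ih

theorem pv_len_ofList_eq_iff {α : Type} [BEq α] [LawfulBEq α] (p : List α) :
    (PySem.Set.ofList p).length = p.length ↔ p.Nodup := by
  constructor
  · intro h
    have he : PySem.Set.ofList p = p := (pv_ofList_sublist p).eq_of_length h
    have hn := PySem.Set.nodup_ofList (xs := p)
    rwa [he] at hn
  · intro h; rw [PySem.Set.ofList_eq_self_of_nodup p h]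

theorem pv_update_self {α : Type} [BEq α] [LawfulBEq α] (l : List α) :
    PySem.Set.update (PySem.Set.ofList l) l = PySem.Set.ofList l := by
  rw [PySem.Set.update_eq_append_filter]
  rw [List.filter_eq_nil_iff.mpr ?h, List.append_nil]
  case h =>
    intro y hy
    have hy' : y ∈ l := (PySem.Set.mem_ofList _ _).mp hy
    simp [hy']

-- A's inner user loop fills exactly the bid entry with the matching users, in order
theorem pv_inner (us : List String) (d : PySem.Dict String (PySem.Set String)) (bid key : String) :
    ((us.foldl (fun d uid =>
        if PySem.Str.len bid ≠ PySem.Str.len uid then d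
        else if pvMatchLoop (bid.toList.zip uid.toList) then
          d.insert bid (PySem.Set.add (d.getD bid []) uid)
        else d) d).getD key [])
    = if key = bid then PySem.Set.update (d.getD bid []) (us.filter (fun uid => pvMatches bid uid))
      else d.getD key [] := by
  induction us generalizing d with
  | nil =>
    simp only [List.foldl_nil, List.filter_nil, PySem.Set.update_nil]
    by_cases hk : key = bid <;> simp [hk]
  | cons u tl ih =>
    simp only [List.foldl_cons, List.filter_cons]
    by_cases hlen : PySem.Str.len bid = PySem.Str.len u
    · by_cases hall : pvMatchLoop (bid.toList.zip u.toList) = true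
      · have hm : pvMatches bid u = true := by
          unfold pvMatches
          rw [pv_matchLoop_eq] at hall
          rw [hall, beq_iff_eq.mpr hlen]
          rfl
        rw [if_neg (not_not_intro hlen), if_pos hall, ih, hm]
        by_cases hk : key = bid
        · subst hk
          simp [PySem.Dict.getD_insert_self, PySem.Set.update_cons]
        · simp only [if_neg hk]
          rw [PySem.Dict.getD_insert]
          simp [hk]
      · have hm : pvMatches bid u = false := by
          unfold pvMatches
          rw [pv_matchLoop_eq] at hall
          rw [Bool.eq_false_iff.mpr hall]
          simp
        rw [if_neg (not_not_intro hlen), if_neg hall, ih, hm]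
        simp
    · have hm : pvMatches bid u = false := by
        unfold pvMatches
        rw [beq_eq_false_iff_ne.mpr hlen]
        simp
      rw [if_pos hlen, ih, hm]
      simp

-- A's outer banned loop: entry for every key occurring in bs is the full matching set
theorem pv_outer (us : List String) (bs : List String) (d : PySem.Dict String (PySem.Set String))
    (hd : ∀ k, d.getD k [] = [] ∨ d.getD k [] = PySem.Set.ofList (us.filter (fun uid => pvMatches k uid)))
    (key : String) :
    ((bs.foldl (fun d bid =>
        us.foldl (fun d uid =>
          if PySem.Str.len bid ≠ PySem.Str.len uid then d
          else if pvMatchLoop (bid.toList.zip uid.toList) then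
            d.insert bid (PySem.Set.add (d.getD bid []) uid)
          else d) d) d).getD key [])
    = if key ∈ bs then PySem.Set.ofList (us.filter (fun uid => pvMatches key uid))
      else d.getD key [] := by
  induction bs generalizing d with
  | nil => simp
  | cons b tl ih =>
    simp only [List.foldl_cons]
    have hstep : ∀ k, (us.foldl (fun d uid =>
          if PySem.Str.len b ≠ PySem.Str.len uid then d
          else if pvMatchLoop (b.toList.zip uid.toList) then
            d.insert b (PySem.Set.add (d.getD b []) uid)
          else d) d).getD k []
        = if k = b then PySem.Set.ofList (us.filter (fun uid => pvMatches b uid))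
          else d.getD k [] := by
      intro k
      rw [pv_inner]
      by_cases hk : k = b
      · subst hk
        rcases hd k with h0 | h1
        · simp [h0, PySem.Set.update_nil_left]
        · simp [h1, pv_update_self]
      · simp [hk]
    rw [ih _ (by
      intro k
      rw [hstep k]
      by_cases hk : k = b
      · subst hk; simp
      · simp only [if_neg hk]; exact hd k)]
    by_cases hmem : key ∈ tl
    · simp [hmem]
    · simp only [hmem, if_false]
      rw [hstep key]
      by_cases hk : key = b <;> simp [hk, hmem]

theorem pv_prod_length (cs : List (List String)) (p : List String) (hp : p ∈ pvProduct cs) :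
    p.length = cs.length := by
  induction cs generalizing p with
  | nil => simp [pvProduct] at hp; simp [hp]
  | cons c rest ih =>
    simp only [pvProduct, List.mem_flatMap, List.mem_map] at hp
    obtain ⟨x, _, q, hq, rfl⟩ := hp
    simp [ih q hq]

-- the backtracking search equals the filtered fold over the full product
theorem pv_go_eq (cs : List (PySem.Set String)) (used : PySem.Set String) (hnd : used.Nodup)
    (found : List (PySem.Set String)) :
    pvGo cs used found
    = (pvProduct cs).foldl (fun acc p =>
        if (used ++ p).Nodup then pvAddFS acc (used ++ p) else acc) found := by
  induction cs generalizing used found with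
  | nil =>
    simp [pvGo, pvProduct, hnd]
  | cons c rest ih =>
    simp only [pvGo, pvProduct]
    rw [pv_foldl_flatMap]
    refine PySem.List.foldl_congr_mem _ _ _ _ ?_
    intro acc u hu
    rw [List.foldl_map]
    by_cases hmem : u ∈ used
    · rw [if_pos ((PySem.Set.contains_iff _ _).mpr hmem)]
      have hskip : ∀ (l : List (List String)) (a : List (PySem.Set String)),
          l.foldl (fun acc q => if (used ++ u :: q).Nodup then pvAddFS acc (used ++ u :: q) else acc) a = a := by
        intro l
        induction l with
        | nil => intro a; rfl
        | cons q ql ihq =>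
          intro a
          have hno : ¬ (used ++ u :: q).Nodup := by
            intro h
            exact (List.disjoint_of_nodup_append h) hmem (by simp)
          simp only [List.foldl_cons, if_neg hno]
          exact ihq a
      exact (hskip (pvProduct rest) acc).symm
    · rw [if_neg (by simp [hmem])]
      rw [ih (PySem.Set.add used u) (PySem.Set.nodup_add _ _ hnd) acc]
      refine PySem.List.foldl_congr_mem _ _ _ _ ?_
      intro a p _
      rw [PySem.Set.add_of_not_mem hmem]
      simp [List.append_assoc]

-- ===== VERDICT (by name: the statement is the Claim_ definition above) =====
theorem solution_spec : Claim_equal_solution := by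
  intro user_id banned_id _
  unfold Spec_solution
  simp only [solution, solution_alt]
  have hres : banned_id.foldl (fun rs bid =>
      rs ++ [(banned_id.foldl (fun d bid =>
        user_id.foldl (fun d uid =>
          if PySem.Str.len bid ≠ PySem.Str.len uid then d
          else if pvMatchLoop (bid.toList.zip uid.toList) then
            d.insert bid (PySem.Set.add (d.getD bid []) uid)
          else d) d) PySem.Dict.empty).getD bid []]) []
      = banned_id.map (fun bid => PySem.Set.ofList (user_id.filter (fun uid => pvMatches bid uid))) := by
    rw [PySem.List.foldl_append_singleton_eq_map, List.nil_append]
    refine List.map_congr_left ?_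
    intro bid hbid
    rw [pv_outer user_id banned_id PySem.Dict.empty (by intro k; left; simp) bid]
    simp [hbid]
  rw [hres]
  set cand := banned_id.map (fun bid => PySem.Set.ofList (user_id.filter (fun uid => pvMatches bid uid))) with hcand
  have hlen : cand.length = banned_id.length := by simp [hcand]
  have hA : (pvProduct cand).foldl (fun ch p =>
      if (PySem.Set.len (PySem.Set.ofList p) == (banned_id.length : Int)) &&
         !(ch.any (fun s => PySem.Set.equal s (PySem.Set.ofList p)))
      then ch ++ [PySem.Set.ofList p] else ch) []
      = (pvProduct cand).foldl (fun acc p => if p.Nodup then pvAddFS acc p else acc) [] := by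
    refine PySem.List.foldl_congr_mem _ _ _ _ ?_
    intro ch p hp
    have hpl : p.length = banned_id.length := by rw [pv_prod_length cand p hp, hlen]
    by_cases hnd : p.Nodup
    · have hof : PySem.Set.ofList p = p := PySem.Set.ofList_eq_self_of_nodup p hnd
      have hl : (PySem.Set.len (PySem.Set.ofList p) == ((banned_id.length : Nat) : Int)) = true := by
        refine beq_iff_eq.mpr ?_
        simp [PySem.Set.len, hof, hpl]
      rw [hl, Bool.true_and, if_pos hnd, hof]
      unfold pvAddFS
      by_cases hany : (ch.any (fun s => PySem.Set.equal s p)) = true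
      · simp [hany]
      · simp [Bool.eq_false_iff.mpr hany]
    · have hne : (PySem.Set.ofList p).length ≠ p.length := by
        intro h; exact hnd ((pv_len_ofList_eq_iff p).mp h)
      have hl : (PySem.Set.len (PySem.Set.ofList p) == ((banned_id.length : Nat) : Int)) = false := by
        refine beq_eq_false_iff_ne.mpr ?_
        intro h
        have h2 : (PySem.Set.ofList p).length = banned_id.length := by
          simpa [PySem.Set.len] using h
        exact hne (h2.trans hpl.symm)
      rw [hl, Bool.false_and, if_neg (by simp), if_neg hnd]
  have hB : pvGo cand [] [] = (pvProduct cand).foldl (fun acc p => if p.Nodup then pvAddFS acc p else acc) [] := by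
    rw [pv_go_eq cand [] (by simp) []]
    simp
  rw [hA, ← hB]
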